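-- pv_equiv track=rewrite | github.com/Zyad1999/Problem-Solving | Even Steps Elimination.py | even_steps_elimination
-- ===== SOURCE A (Python) =====
-- def even_steps_elimination(N):
--     if N == 1:
--         return 1
--
--     else:
--
--         if N % 2 == 1:
--             return even_steps_elimination(N // 2) * 2 + 1
--         else:
--             return even_steps_elimination(N // 2) * 2 - 1
-- ===== SOURCE B (Python) =====
-- def even_steps_elimination(N):
--     bits = []
--     n = N
--     while n > 0:
--         bits.append(n & 1)
--         n >>= 1
--     result = 1
--     for b in reversed(bits[:-1]):
--         result = result * 2 + (1 if b else -1)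
--     return result
-- ===== Notes on version B (the rewrite author's own statement) =====
-- stated objective: alternative
-- what changed: Replaces the top-down recursion on N//2 by an explicit loop: collect N's binary digits bottom-up, then fold over them most-significant-first with result = result*2 +/- 1.
import Mathlib
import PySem

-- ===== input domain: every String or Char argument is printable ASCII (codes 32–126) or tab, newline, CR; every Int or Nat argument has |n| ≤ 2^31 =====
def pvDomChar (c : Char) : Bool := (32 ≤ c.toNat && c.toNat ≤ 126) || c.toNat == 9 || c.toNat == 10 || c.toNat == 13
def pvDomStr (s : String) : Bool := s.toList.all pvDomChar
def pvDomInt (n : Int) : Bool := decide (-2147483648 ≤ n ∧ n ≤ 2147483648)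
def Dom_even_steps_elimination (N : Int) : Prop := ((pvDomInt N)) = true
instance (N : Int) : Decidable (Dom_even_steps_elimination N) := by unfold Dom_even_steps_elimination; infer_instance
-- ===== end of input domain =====

-- B replaces A's top-down recursion on N//2 by an explicit bit-list + fold (alternative decomposition, same cost).


-- ===== PORT A =====
-- A's recursion on an Int does not structurally terminate in Lean; fuel N.toNat suffices on Pre_ (N ≥ 1,
-- since N//2 < N there) and the fuel-exhausted branch is never reached inside Pre_.
def pvAgo : Nat → Int → Int
  | 0, _ => 0
  | fuel+1, N =>
    if N = 1 then 1
    else if PySem.Int.mod N 2 = 1 then pvAgo fuel (PySem.Int.floordiv N 2) * 2 + 1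
    else pvAgo fuel (PySem.Int.floordiv N 2) * 2 - 1

def even_steps_elimination (N : Int) : Int := pvAgo N.toNat N

-- ===== PORT B =====
-- bits of n, least-significant first (the while-loop of Source B)
def pvBitsLSB (n : Nat) : List Nat :=
  if h : n = 0 then [] else n % 2 :: pvBitsLSB (n / 2)
termination_by n
decreasing_by exact Nat.div_lt_self (Nat.pos_of_ne_zero h) one_lt_two

def even_steps_elimination_alt (N : Int) : Int :=
  ((pvBitsLSB N.toNat).dropLast.reverse).foldl
    (fun r b => r * 2 + (if b ≠ 0 then 1 else -1)) 1

-- ===== PRECONDITION & SPEC =====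
-- Pre_ excludes N ≤ 0, where Python A recurses forever (RecursionError) and returns nothing.
def Pre_even_steps_elimination (N : Int) : Prop := 1 ≤ N
instance (N : Int) : Decidable (Pre_even_steps_elimination N) := by unfold Pre_even_steps_elimination; infer_instance
def pvWitness_even_steps_elimination : Int := (6)

def Spec_even_steps_elimination (N : Int) (out : Int) : Prop := out = even_steps_elimination_alt N
instance (N : Int) (out : Int) : Decidable (Spec_even_steps_elimination N out) := by unfold Spec_even_steps_elimination; infer_instance

-- ===== CLAIM (what is proved, stated in full; the proofs are below) =====
def Claim_equal_even_steps_elimination : Prop := ∀ (N : Int), Dom_even_steps_elimination N → Pre_even_steps_elimination N → Spec_even_steps_elimination N (even_steps_elimination N)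

-- ===== LEMMAS AND PROOFS =====
def pvG (n : Nat) : Int :=
  ((pvBitsLSB n).dropLast.reverse).foldl (fun r b => r * 2 + (if b ≠ 0 then 1 else -1)) 1

lemma pvBitsLSB_ne_nil {n : Nat} (h : n ≠ 0) : pvBitsLSB n ≠ [] := by
  rw [pvBitsLSB]; simp [h]

lemma pvG_rec (n : Nat) (h2 : 2 ≤ n) :
    pvG n = pvG (n / 2) * 2 + (if n % 2 ≠ 0 then 1 else -1) := by
  have hn0 : n ≠ 0 := by omega
  have hq0 : n / 2 ≠ 0 := by omega
  unfold pvG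
  rw [pvBitsLSB, dif_neg hn0,
      List.dropLast_cons_of_ne_nil (pvBitsLSB_ne_nil hq0),
      List.reverse_cons, List.foldl_append]
  rcases Nat.mod_two_eq_zero_or_one n with h | h <;> simp [h]

lemma pvG_one : pvG 1 = 1 := by
  unfold pvG
  rw [pvBitsLSB]
  simp [pvBitsLSB]

lemma pvMain (fuel : Nat) : ∀ n : Nat, 1 ≤ n → n ≤ fuel → pvAgo fuel (n : Int) = pvG n := by
  induction fuel with
  | zero => intro n h1 h2; omega
  | succ fuel ih =>
    intro n h1 h2
    by_cases hone : n = 1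
    · subst hone; simp [pvAgo, pvG_one]
    · have h2n : 2 ≤ n := by omega
      have hmod : PySem.Int.mod (n : Int) 2 = ((n % 2 : Nat) : Int) :=
        PySem.Int.mod_natCast n 2
      have hdiv : PySem.Int.floordiv (n : Int) 2 = ((n / 2 : Nat) : Int) :=
        PySem.Int.floordiv_natCast n 2
      have hih : pvAgo fuel ((n / 2 : Nat) : Int) = pvG (n / 2) :=
        ih (n / 2) (by omega) (by omega)
      have hne : (n : Int) ≠ 1 := by exact_mod_cast hone
      rw [pvAgo, if_neg hne, hmod, hdiv, hih, pvG_rec n h2n]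
      rcases Nat.mod_two_eq_zero_or_one n with h | h <;> simp [h, sub_eq_add_neg]

-- ===== VERDICT (by name: the statement is the Claim_ definition above) =====
theorem even_steps_elimination_spec : Claim_equal_even_steps_elimination := by
  intro N _ hpre
  have h1 : (1 : Int) ≤ N := hpre
  have hN : ((N.toNat : Nat) : Int) = N := Int.toNat_of_nonneg (by omega)
  unfold Spec_even_steps_elimination even_steps_elimination even_steps_elimination_alt
  rw [← hN]
  exact pvMain N.toNat N.toNat (by omega) le_rfl
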